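-- pv_equiv track=rewrite | github.com/jebt/kattis | problems/conundrum.py | solve
-- ===== SOURCE A (Python) =====
-- def solve(problem_input: str):
--     word = problem_input.strip()
--     length = len(word)
--     correct = 0
--     for i in range(0, length-2, 3):
--         if word[i] == "P":
--             correct += 1
--         if word[i+1] == "E":
--             correct += 1
--         if word[i+2] == "R":
--             correct += 1
--     return length - correct
-- ===== SOURCE B (Python) =====
-- def solve(problem_input: str):
--     word = problem_input.strip()
--     full = len(word) // 3
--     pattern = "PER" * full
--     matches = sum(a == b for a, b in zip(word, pattern))
--     return len(word) - matches
-- ===== Notes on version B (the rewrite author's own statement) =====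
-- stated objective: simpler
-- what changed: Replaces the stride-3 index loop with three per-triple character tests by building the expected repeating pattern of length 3*(len//3) once and summing equality over zip(word, pattern), so all index arithmetic disappears.
import Mathlib
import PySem

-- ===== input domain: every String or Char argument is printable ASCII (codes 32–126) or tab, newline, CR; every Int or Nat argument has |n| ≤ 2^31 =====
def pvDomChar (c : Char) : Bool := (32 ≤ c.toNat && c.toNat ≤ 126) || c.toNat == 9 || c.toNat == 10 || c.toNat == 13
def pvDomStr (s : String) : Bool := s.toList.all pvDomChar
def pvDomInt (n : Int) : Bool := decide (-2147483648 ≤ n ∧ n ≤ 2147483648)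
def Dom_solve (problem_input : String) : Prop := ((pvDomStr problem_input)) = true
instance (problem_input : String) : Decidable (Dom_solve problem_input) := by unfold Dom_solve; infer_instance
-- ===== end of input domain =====

-- B replaces A's index arithmetic over range(0, len-2, 3) by building the expected
-- pattern 'PER' * (len // 3) and summing matches over zip (objective: simpler).

-- ===== PORT A =====
-- the body of A's for-loop (the three ifs, in order)
def solveStep (word : List Char) (correct : Int) (i : Int) : Int :=
  let correct := if PySem.List.pyGetD word i ' ' = 'P' then correct + 1 else correct
  let correct := if PySem.List.pyGetD word (i + 1) ' ' = 'E' then correct + 1 else correct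
  if PySem.List.pyGetD word (i + 2) ' ' = 'R' then correct + 1 else correct

def solve (problem_input : String) : Int :=
  let word := (PySem.Str.strip problem_input).toList
  let length : Int := word.length
  let correct : Int := (PySem.List.pyRange 0 (length - 2) 3).foldl (solveStep word) 0
  length - correct

-- ===== PORT B =====
def solve_alt (problem_input : String) : Int :=
  let word := (PySem.Str.strip problem_input).toList
  let full := word.length / 3
  let pattern := (List.replicate full ['P', 'E', 'R']).flatten
  let match_count : Int := ((word.zip pattern).map (fun p => if p.1 = p.2 then (1 : Int) else 0)).sum
  (word.length : Int) - match_count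

-- ===== PRECONDITION & SPEC =====
def Spec_solve (problem_input : String) (out : Int) : Prop := out = solve_alt problem_input
instance (problem_input : String) (out : Int) : Decidable (Spec_solve problem_input out) := by unfold Spec_solve; infer_instance

-- ===== CLAIM (what is proved, stated in full; the proofs are below) =====
def Claim_equal_solve : Prop := ∀ (problem_input : String), Dom_solve problem_input → Spec_solve problem_input (solve problem_input)

-- ===== LEMMAS AND PROOFS =====

-- the k-th triple's score over the word w
def pvTriple (w : List Char) (k : Nat) : Int :=
  (if w.getD (3 * k) ' ' = 'P' then 1 else 0)
  + (if w.getD (3 * k + 1) ' ' = 'E' then 1 else 0)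
  + (if w.getD (3 * k + 2) ' ' = 'R' then 1 else 0)

theorem getD_cons3 (a b c : Char) (rest : List Char) (j : Nat) (d : Char) :
    (a :: b :: c :: rest).getD (j + 3) d = rest.getD j d := by
  rw [show j + 3 = (j + 1 + 1) + 1 by ring]
  simp

-- B's zip-sum equals the sum of triple scores, for any full with 3*full ≤ |w|
theorem zip_sum_eq (full : Nat) : ∀ (w : List Char), 3 * full ≤ w.length →
    ((w.zip ((List.replicate full ['P', 'E', 'R']).flatten)).map
        (fun p => if p.1 = p.2 then (1 : Int) else 0)).sum
      = ((List.range full).map (pvTriple w)).sum := by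
  induction full with
  | zero => intro w _; simp
  | succ m ih =>
    intro w hw
    match w with
    | a :: b :: c :: rest =>
      have h3 : 3 * m ≤ rest.length := by simp at hw; omega
      have hcomp : (pvTriple (a :: b :: c :: rest)) ∘ Nat.succ = pvTriple rest := by
        funext k
        simp only [Function.comp_apply, pvTriple, Nat.mul_succ]
        have g1 := getD_cons3 a b c rest (3 * k) ' '
        have g2 : (a :: b :: c :: rest).getD (3 * k + 3 + 1) ' ' = rest.getD (3 * k + 1) ' ' := by
          rw [show 3 * k + 3 + 1 = (3 * k + 1) + 3 by ring]; exact getD_cons3 ..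
        have g3 : (a :: b :: c :: rest).getD (3 * k + 3 + 2) ' ' = rest.getD (3 * k + 2) ' ' := by
          rw [show 3 * k + 3 + 2 = (3 * k + 2) + 3 by ring]; exact getD_cons3 ..
        simp only [g1, g2, g3]
      rw [List.range_succ_eq_map, List.map_cons, List.sum_cons, List.map_map, hcomp,
        ← ih rest h3]
      simp only [List.replicate_succ, List.flatten_cons, List.cons_append, List.nil_append,
        List.zip_cons_cons, List.map_cons, List.sum_cons]
      simp [pvTriple]
      ring
    | [] => simp at hw
    | [a] => simp at hw; omega
    | [a, b] => simp at hw; omega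

-- ===== VERDICT (by name: the statement is the Claim_ definition above) =====
theorem pyRange3_eq (n : Nat) : PySem.List.pyRange 0 ((n : Int) - 2) 3
    = List.map (fun k : Nat => (0 : Int) + 3 * (k : Int)) (List.range (n / 3)) := by
  rw [PySem.List.pyRange_of_pos _ _ (by norm_num : (0 : Int) < 3)]
  congr 1
  by_cases h : (0 : Int) < (n : Int) - 2
  · rw [if_pos h]
    have e : (n : Int) - 2 - 0 + 3 - 1 = (n : Int) := by ring
    rw [e]
    congr 1
  · rw [if_neg h]
    congr 1
    omega

theorem solveStep_eq (w : List Char) (c : Int) (k : Nat) :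
    solveStep w c ((0 : Int) + 3 * (k : Int)) = c + pvTriple w k := by
  have e0 : (0 : Int) + 3 * (k : Int) = ((3 * k : Nat) : Int) := by push_cast; ring
  have e1 : ((3 * k : Nat) : Int) + 1 = ((3 * k + 1 : Nat) : Int) := by push_cast; ring
  have e2 : ((3 * k : Nat) : Int) + 2 = ((3 * k + 2 : Nat) : Int) := by push_cast; ring
  simp only [solveStep, e0, e1, e2, PySem.List.pyGetD_natCast, pvTriple]
  split_ifs <;> ring

-- A's whole loop computes the sum of the triple scores
theorem a_fold_eq (w : List Char) :
    (PySem.List.pyRange 0 ((w.length : Int) - 2) 3).foldl (solveStep w) 0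
      = ((List.range (w.length / 3)).map (pvTriple w)).sum := by
  rw [pyRange3_eq, List.foldl_map]
  have : (fun (c : Int) (k : Nat) => solveStep w c ((0 : Int) + 3 * (k : Int)))
      = fun (c : Int) (k : Nat) => c + (pvTriple w) k := by
    funext c k; exact solveStep_eq w c k
  rw [show List.foldl (fun (c : Int) (k : Nat) => solveStep w c ((0 : Int) + 3 * (k : Int))) 0
        (List.range (w.length / 3))
      = List.foldl (fun (c : Int) (k : Nat) => c + pvTriple w k) 0
        (List.range (w.length / 3)) from by rw [this],
    PySem.List.foldl_add]
  ring

-- ===== VERDICT (by name: the statement is the Claim_ definition above) =====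
theorem solve_spec : Claim_equal_solve := by
  intro problem_input _
  unfold Spec_solve
  simp only [solve, solve_alt]
  rw [a_fold_eq, zip_sum_eq _ _ (by rw [Nat.mul_comm]; exact Nat.div_mul_le_self (PySem.Str.strip problem_input).toList.length 3)]
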